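-- pv_equiv track=rewrite | github.com/Aakarshhhhh/Document-difference-detection- | utils/text_comparison.py | get_text_diff_summary
-- ===== SOURCE A (Python) =====
-- def get_text_diff_summary(text_differences):
--     """Summarizes text differences with detailed counts."""
--     additions = sum(1 for d_type, _, _ in text_differences if d_type == 'addition')
--     removals = sum(1 for d_type, _, _ in text_differences if d_type == 'removal')
--     modifications = sum(1 for d_type, _, _ in text_differences if d_type == 'modification')
--
--     return {
--         "additions": additions,
--         "removals": removals,
--         "modifications": modifications,
--         "total_changes": additions + removals + modifications
--     }
-- ===== SOURCE B (Python) =====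
-- def get_text_diff_summary(text_differences):
--     """Summarizes text differences with detailed counts."""
--     counts = {}
--     for d_type, _, _ in text_differences:
--         counts[d_type] = counts.get(d_type, 0) + 1
--     additions = counts.get('addition', 0)
--     removals = counts.get('removal', 0)
--     modifications = counts.get('modification', 0)
--     return {
--         "additions": additions,
--         "removals": removals,
--         "modifications": modifications,
--         "total_changes": additions + removals + modifications
--     }
-- ===== Notes on version B (the rewrite author's own statement) =====
-- stated objective: simpler
-- what changed: Replaces A's three separate generator passes over the list with one pass that builds a dict counter keyed by d_type, then reads the three counts with .get(key, 0).
import Mathlib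
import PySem

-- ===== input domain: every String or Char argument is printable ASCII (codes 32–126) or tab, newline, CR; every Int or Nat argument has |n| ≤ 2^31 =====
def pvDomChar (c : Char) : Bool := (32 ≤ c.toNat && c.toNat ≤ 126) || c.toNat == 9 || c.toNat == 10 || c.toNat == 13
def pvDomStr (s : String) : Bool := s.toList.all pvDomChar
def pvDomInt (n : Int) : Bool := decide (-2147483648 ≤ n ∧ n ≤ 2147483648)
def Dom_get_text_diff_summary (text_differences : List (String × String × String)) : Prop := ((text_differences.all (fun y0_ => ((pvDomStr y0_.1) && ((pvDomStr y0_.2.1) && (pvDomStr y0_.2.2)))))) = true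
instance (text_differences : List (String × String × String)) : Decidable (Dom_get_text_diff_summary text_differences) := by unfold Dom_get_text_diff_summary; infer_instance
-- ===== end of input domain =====

-- B replaces A's three passes over the list with a single pass building a dict counter (simpler).


-- ===== PORT A =====
def get_text_diff_summary (text_differences : List (String × String × String)) : List (String × Int) :=
  let additions : Int := text_differences.foldl (fun acc d => if d.1 == "addition" then acc + 1 else acc) 0
  let removals : Int := text_differences.foldl (fun acc d => if d.1 == "removal" then acc + 1 else acc) 0
  let modifications : Int := text_differences.foldl (fun acc d => if d.1 == "modification" then acc + 1 else acc) 0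
  [("additions", additions), ("removals", removals), ("modifications", modifications),
   ("total_changes", additions + removals + modifications)]

-- ===== PORT B =====
def get_text_diff_summary_alt (text_differences : List (String × String × String)) : List (String × Int) :=
  let counts : PySem.Dict String Int :=
    text_differences.foldl (fun d x => d.insert x.1 (d.getD x.1 0 + 1)) PySem.Dict.empty
  let additions := counts.getD "addition" 0
  let removals := counts.getD "removal" 0
  let modifications := counts.getD "modification" 0
  [("additions", additions), ("removals", removals), ("modifications", modifications),
   ("total_changes", additions + removals + modifications)]

-- ===== PRECONDITION & SPEC =====
def Spec_get_text_diff_summary (text_differences : List (String × String × String)) (out : List (String × Int)) : Prop := out = get_text_diff_summary_alt text_differences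
instance (text_differences : List (String × String × String)) (out : List (String × Int)) : Decidable (Spec_get_text_diff_summary text_differences out) := by unfold Spec_get_text_diff_summary; infer_instance

-- ===== CLAIM (what is proved, stated in full; the proofs are below) =====
def Claim_equal_get_text_diff_summary : Prop := ∀ (text_differences : List (String × String × String)), Dom_get_text_diff_summary text_differences → Spec_get_text_diff_summary text_differences (get_text_diff_summary text_differences)

-- ===== LEMMAS AND PROOFS =====

-- ===== VERDICT (by name: the statement is the Claim_ definition above) =====
-- A's 'sum(1 for … if d_type == k)' equals the count of k among the first components.
theorem foldl_count_eq (k : String) (l : List (String × String × String)) (acc : Int) :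
    l.foldl (fun acc d => if d.1 == k then acc + 1 else acc) acc
      = acc + ((l.map (·.1)).count k : Int) := by
  induction l generalizing acc with
  | nil => simp
  | cons x xs ih =>
    simp only [List.foldl_cons, List.map_cons, List.count_cons, ih]
    by_cases h : x.1 = k
    · simp [h]; ring
    · simp [h, beq_iff_eq]

theorem counter_getD' (k : String) (l : List (String × String × String))
    (d : PySem.Dict String Int) :
    (l.foldl (fun d x => d.insert x.1 (d.getD x.1 0 + 1)) d).getD k 0
      = d.getD k 0 + ((l.map (·.1)).count k : Int) := by
  induction l generalizing d with
  | nil => simp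
  | cons x xs ih =>
    simp only [List.foldl_cons, List.map_cons, List.count_cons, ih]
    rw [PySem.Dict.getD_insert]
    by_cases h : k = x.1
    · simp [h]; ring
    · simp [h, Ne.symm h, beq_iff_eq]

theorem counter_getD (k : String) (l : List (String × String × String)) :
    (l.foldl (fun d x => d.insert x.1 (d.getD x.1 0 + 1)) PySem.Dict.empty).getD k 0
      = ((l.map (·.1)).count k : Int) := by
  rw [counter_getD']; simp [PySem.Dict.empty, PySem.Dict.getD, PySem.Dict.get?]

theorem get_text_diff_summary_spec : Claim_equal_get_text_diff_summary := by
  intro td _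
  show _ = _
  simp only [get_text_diff_summary, get_text_diff_summary_alt, foldl_count_eq, counter_getD,
    zero_add]
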